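-- pv_equiv track=rewrite | github.com/TheJade/CSacademy | Easy/Four_X-tremes.py | four_xtremes
-- ===== SOURCE A (Python) =====
-- def four_xtremes(a, b, c, d):
--     sortcount = 0
--     while sortcount < 3:
--         if a > b:
--             temp = a
--             a = b
--             b = temp
--         else:
--             sortcount = 1
--         if b > c:
--             temp = b
--             b = c
--             c = temp
--         else:
--             sortcount += 1
--         if c > d:
--             temp = c
--             c = d
--             d = temp
--         else:
--             sortcount += 1
--     return d - a
-- ===== SOURCE B (Python) =====
-- def four_xtremes(a, b, c, d):
--     return max(a, b, c, d) - min(a, b, c, d)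
-- ===== Notes on version B (the rewrite author's own statement) =====
-- stated objective: simpler
-- what changed: Replaced the in-place bubble-sort loop (with its sortcount state and swaps) by the closed form max(a,b,c,d) - min(a,b,c,d).
import Mathlib
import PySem

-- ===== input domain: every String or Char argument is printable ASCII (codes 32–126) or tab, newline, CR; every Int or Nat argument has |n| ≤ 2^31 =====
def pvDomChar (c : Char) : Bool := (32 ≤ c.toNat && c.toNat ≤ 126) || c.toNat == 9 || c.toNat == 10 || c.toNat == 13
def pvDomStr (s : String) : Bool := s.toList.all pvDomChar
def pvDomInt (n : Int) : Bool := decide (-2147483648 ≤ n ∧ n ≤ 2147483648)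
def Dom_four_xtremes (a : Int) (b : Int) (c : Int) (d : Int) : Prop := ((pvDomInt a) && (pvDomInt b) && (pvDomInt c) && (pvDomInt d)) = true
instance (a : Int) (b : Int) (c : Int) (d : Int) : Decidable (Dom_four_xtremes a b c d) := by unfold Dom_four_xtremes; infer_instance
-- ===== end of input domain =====

-- B replaces A's in-place bubble-sort loop by the closed form max(a,b,c,d) - min(a,b,c,d); objective: simpler.

-- ===== PORT A =====
-- A's while loop, transliterated: one iteration = the three compare/swap steps on
-- (sortcount, a, b, c, d).  The fuel argument is a pure totality guard: the Python
-- loop always exits within 3 passes (proved below via the invariant), so fuel 4 is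
-- never exhausted; the fuel-0 branch returns d - a like the loop exit.
def fourXtremesLoop : Nat → Int → Int → Int → Int → Int → Int
  | fuel, s, a, b, c, d =>
    if 3 ≤ s then d - a
    else
      match fuel with
      | 0 => d - a
      | fuel + 1 =>
        -- if a > b: swap a,b  else: sortcount = 1
        let p1 : Int × Int × Int := if a > b then (s, b, a) else (1, a, b)
        -- if b > c: swap b,c  else: sortcount += 1
        let p2 : Int × Int × Int := if p1.2.2 > c then (p1.1, c, p1.2.2) else (p1.1 + 1, p1.2.2, c)
        -- if c > d: swap c,d  else: sortcount += 1
        let p3 : Int × Int × Int := if p2.2.2 > d then (p2.1, d, p2.2.2) else (p2.1 + 1, p2.2.2, d)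
        fourXtremesLoop fuel p3.1 p1.2.1 p2.2.1 p3.2.1 p3.2.2

def four_xtremes (a : Int) (b : Int) (c : Int) (d : Int) : Int :=
  fourXtremesLoop 4 0 a b c d

-- ===== PORT B =====
def four_xtremes_alt (a : Int) (b : Int) (c : Int) (d : Int) : Int :=
  max a (max b (max c d)) - min a (min b (min c d))

-- ===== PRECONDITION & SPEC =====
def Spec_four_xtremes (a : Int) (b : Int) (c : Int) (d : Int) (out : Int) : Prop := out = four_xtremes_alt a b c d
instance (a : Int) (b : Int) (c : Int) (d : Int) (out : Int) : Decidable (Spec_four_xtremes a b c d out) := by unfold Spec_four_xtremes; infer_instance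

-- ===== CLAIM (what is proved, stated in full; the proofs are below) =====
def Claim_equal_four_xtremes : Prop := ∀ (a : Int) (b : Int) (c : Int) (d : Int), Dom_four_xtremes a b c d → Spec_four_xtremes a b c d (four_xtremes a b c d)

-- ===== LEMMAS AND PROOFS =====

-- Loop invariant of A's while loop, on the state at the top of an iteration:
--   once sortcount ≥ 1, d is the maximum;
--   once sortcount ≥ 2, a ≤ b or a ≤ c;
--   once sortcount ≥ 3 (the exit condition), the state is sorted.
def fxInv (s a b c d : Int) : Prop :=
  (1 ≤ s → a ≤ d ∧ b ≤ d ∧ c ≤ d) ∧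
  (2 ≤ s → (a ≤ b ∨ a ≤ c)) ∧
  (3 ≤ s → a ≤ b ∧ b ≤ c ∧ c ≤ d)

-- Fuel sufficiency: how many more passes may be needed, given how sorted the state is.
def fxFuelOk (fuel : Nat) (a b c d : Int) : Prop :=
  4 ≤ fuel ∨
  (3 ≤ fuel ∧ (a ≤ d ∧ b ≤ d ∧ c ≤ d)) ∨
  (2 ≤ fuel ∧ (a ≤ c ∧ b ≤ c ∧ a ≤ d ∧ b ≤ d ∧ c ≤ d)) ∨
  (1 ≤ fuel ∧ (a ≤ b ∧ b ≤ c ∧ c ≤ d))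

theorem fourXtremesLoop_eq (fuel : Nat) :
    ∀ (s a b c d : Int), fxInv s a b c d → (3 ≤ s ∨ fxFuelOk fuel a b c d) →
      fourXtremesLoop fuel s a b c d =
        max a (max b (max c d)) - min a (min b (min c d)) := by
  induction fuel with
  | zero =>
    intro s a b c d hInv hOk
    rw [fourXtremesLoop]
    rcases hOk with hs | hOk
    · rw [if_pos hs]
      have := hInv.2.2 hs
      omega
    · -- with fuel 0 every fxFuelOk disjunct forces 3 ≤ s impossible except none;
      -- all fuel bounds fail, contradiction unless 3 ≤ s
      by_cases hs : 3 ≤ s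
      · rw [if_pos hs]
        have := hInv.2.2 hs
        omega
      · exfalso
        unfold fxFuelOk at hOk
        omega
  | succ n ih =>
    intro s a b c d hInv hOk
    rw [fourXtremesLoop]
    by_cases hs : 3 ≤ s
    · rw [if_pos hs]
      have := hInv.2.2 hs
      omega
    · rw [if_neg hs]
      obtain ⟨h1, h2, h3⟩ := hInv
      split_ifs with g1 <;> dsimp only <;> split_ifs with g2 g3 g3 <;>
        dsimp only at g2 g3 ⊢ <;>
        · rw [ih _ _ _ _ _ (by unfold fxInv; omega)
            (by unfold fxFuelOk at hOk ⊢; omega)]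
          try omega

-- ===== VERDICT (by name: the statement is the Claim_ definition above) =====
theorem four_xtremes_spec : Claim_equal_four_xtremes := by
  intro a b c d _
  unfold Spec_four_xtremes four_xtremes four_xtremes_alt
  exact fourXtremesLoop_eq 4 0 a b c d
    (by unfold fxInv; omega) (Or.inr (Or.inl (by norm_num)))
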